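-- pv_equiv track=rewrite | github.com/WStefani/PUF-Security-Metrics-Single-Bit-Flips | aux_funcs/simulation_funcs.py | produce_loop_structure
-- ===== SOURCE A (Python) =====
-- def produce_loop_structure(last_loop_no_tup):
--     """ Function to produce a list respresenting the FF Arbiter PUF loop structure
--
--         last_loop_no_tup:   tuple           - of type ((a,b), n) with (a,b) the loop and n number of loops
--
--         loops:              list of tuples  - list to represent the loop structure
--     """
--
--     loops       = []
--     last_loop   = last_loop_no_tup[0]
--
--     loops.append(last_loop)
--
--     dist        = last_loop[1]-last_loop[0]
--
--     prev_loop   = last_loop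
--     for i in range(last_loop_no_tup[1]-1):
--         prev_loop = (prev_loop[0]-dist+1, prev_loop[0]+1)
--         loops.append(prev_loop)
--
--     loops.reverse()
--
--     return loops
-- ===== SOURCE B (Python) =====
-- def produce_loop_structure(last_loop_no_tup):
--     """Closed-form rebuild: each loop is a function of its index, no running state."""
--     (a, b), n = last_loop_no_tup
--     dist = b - a
--     count = n if n >= 1 else 1
--     return [(a - k*(dist-1), a - (k-1)*(dist-1) + 1) for k in range(count-1, -1, -1)]
-- ===== Notes on version B (the rewrite author's own statement) =====
-- stated objective: simpler
-- what changed: Replaces A's stateful loop (carrying prev_loop, appending, then reversing) by a single comprehension that computes each loop tuple in final order from a closed-form function of its index, with max(1,n) terms.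
import Mathlib
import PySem

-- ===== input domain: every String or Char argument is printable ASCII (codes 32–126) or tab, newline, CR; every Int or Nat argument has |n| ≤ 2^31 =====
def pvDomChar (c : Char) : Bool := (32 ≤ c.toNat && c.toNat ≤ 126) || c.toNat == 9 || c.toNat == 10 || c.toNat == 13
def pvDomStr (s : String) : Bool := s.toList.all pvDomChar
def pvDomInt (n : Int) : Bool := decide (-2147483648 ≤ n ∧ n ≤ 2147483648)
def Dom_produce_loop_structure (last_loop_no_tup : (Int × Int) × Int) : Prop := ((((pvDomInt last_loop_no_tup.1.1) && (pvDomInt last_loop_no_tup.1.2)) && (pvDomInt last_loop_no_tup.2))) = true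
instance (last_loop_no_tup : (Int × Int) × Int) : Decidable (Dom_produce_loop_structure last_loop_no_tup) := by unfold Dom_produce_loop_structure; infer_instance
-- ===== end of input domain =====

-- B replaces A's stateful loop + final reverse by a closed-form per-index formula
-- emitted directly in final order (objective: simpler decomposition, same cost).

-- ===== PORT A =====
def produce_loop_structure (last_loop_no_tup : (Int × Int) × Int) : List (Int × Int) :=
  let last_loop := last_loop_no_tup.1
  let loops : List (Int × Int) := [] ++ [last_loop]
  let dist := last_loop.2 - last_loop.1
  let st :=
    (PySem.List.pyRange 0 (last_loop_no_tup.2 - 1) 1).foldl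
      (fun (s : List (Int × Int) × (Int × Int)) _ =>
        let prev_loop := (s.2.1 - dist + 1, s.2.1 + 1)
        (s.1 ++ [prev_loop], prev_loop))
      (loops, last_loop)
  st.1.reverse

-- ===== PORT B =====
def produce_loop_structure_alt (last_loop_no_tup : (Int × Int) × Int) : List (Int × Int) :=
  let a := last_loop_no_tup.1.1
  let b := last_loop_no_tup.1.2
  let n := last_loop_no_tup.2
  let dist := b - a
  let count := if n ≥ 1 then n else 1
  (PySem.List.pyRange (count - 1) (-1) (-1)).map
    (fun k => (a - k * (dist - 1), a - (k - 1) * (dist - 1) + 1))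

-- ===== PRECONDITION & SPEC =====
def Spec_produce_loop_structure (last_loop_no_tup : (Int × Int) × Int) (out : List (Int × Int)) : Prop := out = produce_loop_structure_alt last_loop_no_tup
instance (last_loop_no_tup : (Int × Int) × Int) (out : List (Int × Int)) : Decidable (Spec_produce_loop_structure last_loop_no_tup out) := by unfold Spec_produce_loop_structure; infer_instance

-- ===== CLAIM (what is proved, stated in full; the proofs are below) =====
def Claim_equal_produce_loop_structure : Prop := ∀ (last_loop_no_tup : (Int × Int) × Int), Dom_produce_loop_structure last_loop_no_tup → Spec_produce_loop_structure last_loop_no_tup (produce_loop_structure last_loop_no_tup)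

-- ===== LEMMAS AND PROOFS =====

/-- The closed-form k-th loop (counted backwards from the last loop). -/
def pvTerm (a dist : Int) (k : Int) : Int × Int :=
  (a - k * (dist - 1), a - (k - 1) * (dist - 1) + 1)

lemma pvTerm_zero (a dist : Int) : pvTerm a dist 0 = (a, a + dist) := by
  simp only [pvTerm, Prod.mk.injEq]
  constructor <;> ring

lemma pvTerm_step (a dist k : Int) :
    ((pvTerm a dist k).1 - dist + 1, (pvTerm a dist k).1 + 1) = pvTerm a dist (k + 1) := by
  simp only [pvTerm, Prod.mk.injEq]
  constructor <;> ring

lemma pvFoldA (a b : Int) (m : Nat) :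
    (List.range m).foldl
      (fun (s : List (Int × Int) × (Int × Int)) (_ : Nat) =>
        (s.1 ++ [(s.2.1 - (b - a) + 1, s.2.1 + 1)], (s.2.1 - (b - a) + 1, s.2.1 + 1)))
      ([(a, b)], (a, b))
    = ((List.range (m + 1)).map (fun k : Nat => pvTerm a (b - a) (k : Int)),
       pvTerm a (b - a) (m : Int)) := by
  induction m with
  | zero =>
    have h0 : pvTerm a (b - a) 0 = (a, b) := by rw [pvTerm_zero]; simp
    simp [List.range_succ, h0]
  | succ m ih =>
    rw [List.range_succ, List.foldl_append, ih]
    simp only [List.foldl_cons, List.foldl_nil]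
    refine Prod.ext ?_ ?_
    · show _ ++ _ = _
      rw [List.range_succ (n := m + 1), List.map_append]
      congr 1
      simp only [List.map_cons, List.map_nil, List.cons.injEq, and_true]
      rw [pvTerm_step]
      norm_cast
    · show ((pvTerm a (b - a) (m : Int)).1 - (b - a) + 1, (pvTerm a (b - a) (m : Int)).1 + 1) = _
      rw [pvTerm_step]
      norm_cast

lemma pvReverseMap (a dist : Int) (N : Nat) :
    ((List.range N).map (fun k : Nat => pvTerm a dist (k : Int))).reverse
    = (List.range N).map (fun k : Nat => pvTerm a dist ((N : Int) - 1 - (k : Int))) := by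
  apply List.ext_getElem
  · simp
  · intro i h1 h2
    simp only [List.length_reverse, List.length_map, List.length_range] at h1
    simp only [List.getElem_reverse, List.getElem_map, List.getElem_range, List.length_map,
      List.length_range]
    congr 1
    omega

theorem produce_loop_structure_spec : Claim_equal_produce_loop_structure := by
  intro t _
  unfold Spec_produce_loop_structure produce_loop_structure produce_loop_structure_alt
  obtain ⟨⟨a, b⟩, n⟩ := t
  simp only [List.nil_append]
  by_cases hn : n ≥ 1
  · rw [if_pos hn]
    rw [PySem.List.pyRange_one, PySem.List.pyRange_neg_one, List.foldl_map, List.map_map]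
    rw [pvFoldA a b ((n - 1 - 0).toNat)]
    rw [pvReverseMap]
    have hN : (n - 1 - 0).toNat + 1 = (n - 1 - (-1)).toNat := by omega
    rw [hN]
    apply List.map_congr_left
    intro k _
    have harg : (((n - 1 - (-1)).toNat : Int)) - 1 - (k : Int) = n - 1 - (k : Int) := by omega
    rw [harg]
    simp [pvTerm, Function.comp]
  · rw [if_neg hn]
    rw [PySem.List.pyRange_one_eq_nil (by omega)]
    have h0 : PySem.List.pyRange (1 - 1) (-1) (-1) = [0] := by
      rw [show (1 : Int) - 1 = 0 by ring, PySem.List.pyRange_neg_one]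
      decide
    rw [h0]
    simp only [List.foldl_nil, List.map_cons, List.map_nil, List.reverse_cons,
      List.reverse_nil, List.nil_append, List.cons.injEq, and_true, Prod.mk.injEq]
    constructor <;> ring
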